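-- pv_equiv track=rewrite | github.com/mrzlkaaa/core_ununiformity | main/model.py | _get_initial_scores_indexes
-- ===== SOURCE A (Python) =====
-- def _get_initial_scores_indexes(
--
--     unsorted_arr:list,
--     sorted_arr:list
-- ):
--     unsorted_inds = []
--     for o in range(len(unsorted_arr)):
--         unsorted_ind = []
--         for _, i in enumerate(sorted_arr[o]):
--             for nj, j in enumerate(unsorted_arr[o]):
--                 if i == j and not nj in unsorted_ind:
--                     unsorted_ind.append(nj)
--
--         unsorted_inds.append(unsorted_ind)
--     return unsorted_inds
-- ===== SOURCE B (Python) =====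
-- def _get_initial_scores_indexes(
--     unsorted_arr: list,
--     sorted_arr: list
-- ):
--     res = []
--     for urow, srow in zip(unsorted_arr, sorted_arr):
--         pos = {}
--         for idx, v in enumerate(urow):
--             pos.setdefault(v, []).append(idx)
--         row = []
--         for v in srow:
--             row.extend(pos.pop(v, []))
--         res.append(row)
--     return res
-- ===== Notes on version B (the rewrite author's own statement) =====
-- stated objective: faster
-- what changed: Per row, a single pass builds a dict value->list of ascending indices once, and each sorted value pops its whole index list in O(1), replacing A's scan of the entire unsorted row (with a linear membership test) for every sorted element.
import Mathlib
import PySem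

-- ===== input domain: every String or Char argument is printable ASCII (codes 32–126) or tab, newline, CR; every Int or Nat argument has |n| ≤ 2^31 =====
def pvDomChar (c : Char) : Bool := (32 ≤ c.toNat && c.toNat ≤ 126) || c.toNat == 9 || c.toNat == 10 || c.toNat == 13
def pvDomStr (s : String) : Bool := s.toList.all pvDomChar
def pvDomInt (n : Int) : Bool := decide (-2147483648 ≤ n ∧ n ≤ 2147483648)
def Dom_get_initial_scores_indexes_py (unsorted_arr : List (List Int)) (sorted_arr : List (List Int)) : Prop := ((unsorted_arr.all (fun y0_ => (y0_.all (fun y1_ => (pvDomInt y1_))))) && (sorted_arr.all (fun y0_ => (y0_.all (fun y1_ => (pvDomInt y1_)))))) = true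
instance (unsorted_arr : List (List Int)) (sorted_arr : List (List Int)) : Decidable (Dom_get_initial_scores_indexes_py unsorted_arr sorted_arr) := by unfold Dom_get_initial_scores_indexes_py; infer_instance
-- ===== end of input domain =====

-- B replaces A's rescan of the whole unsorted row (with a linear membership test) per sorted
-- element by one dict value→ascending-index-list built per row, popped per sorted value (faster).

-- ===== PORT A =====
-- literal port of A: for o in range(len(unsorted_arr)); nested enumerate scans with a
-- membership test on the accumulated index list; indexing via pyGetD (Pre_ keeps it in range)
def get_initial_scores_indexes_py (unsorted_arr : List (List Int)) (sorted_arr : List (List Int)) : List (List Int) :=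
  (PySem.List.pyRange 0 (PySem.List.len unsorted_arr) 1).foldl (fun unsorted_inds o =>
    let srow := PySem.List.pyGetD sorted_arr o []
    let urow := PySem.List.pyGetD unsorted_arr o []
    let unsorted_ind := (PySem.List.enumerate srow).foldl (fun ind q =>
      (PySem.List.enumerate urow).foldl (fun ind2 p =>
        if q.2 == p.2 && !(ind2.contains p.1) then ind2 ++ [p.1] else ind2) ind) []
    unsorted_inds ++ [unsorted_ind]) []

-- ===== PORT B =====
-- literal port of Source B: zip rows; build pos : value → list of indices by one pass
-- (setdefault/append = Dict.modify with default []); then pop (getD + erase) per sorted value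
def get_initial_scores_indexes_py_alt (unsorted_arr : List (List Int)) (sorted_arr : List (List Int)) : List (List Int) :=
  (unsorted_arr.zip sorted_arr).map (fun pr =>
    let pos : PySem.Dict Int (List Int) :=
      (PySem.List.enumerate pr.1).foldl (fun d p => d.modify p.2 [] (· ++ [p.1])) PySem.Dict.empty
    (pr.2.foldl (fun st v => (st.1 ++ st.2.getD v [], st.2.erase v)) (([] : List Int), pos)).1)

-- ===== PRECONDITION & SPEC =====
-- Pre_ excludes exactly the inputs where A raises IndexError (sorted_arr[o] out of range)
def Pre_get_initial_scores_indexes_py (unsorted_arr : List (List Int)) (sorted_arr : List (List Int)) : Prop :=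
  unsorted_arr.length ≤ sorted_arr.length
instance (unsorted_arr : List (List Int)) (sorted_arr : List (List Int)) : Decidable (Pre_get_initial_scores_indexes_py unsorted_arr sorted_arr) := by unfold Pre_get_initial_scores_indexes_py; infer_instance
def pvWitness_get_initial_scores_indexes_py : List (List Int) × List (List Int) := ([[3, 1, 2, 1]], [[1, 1, 2, 3]])

def Spec_get_initial_scores_indexes_py (unsorted_arr : List (List Int)) (sorted_arr : List (List Int)) (out : List (List Int)) : Prop := out = get_initial_scores_indexes_py_alt unsorted_arr sorted_arr
instance (unsorted_arr : List (List Int)) (sorted_arr : List (List Int)) (out : List (List Int)) : Decidable (Spec_get_initial_scores_indexes_py unsorted_arr sorted_arr out) := by unfold Spec_get_initial_scores_indexes_py; infer_instance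

-- ===== CLAIM (what is proved, stated in full; the proofs are below) =====
def Claim_equal_get_initial_scores_indexes_py : Prop := ∀ (unsorted_arr : List (List Int)) (sorted_arr : List (List Int)), Dom_get_initial_scores_indexes_py unsorted_arr sorted_arr → Pre_get_initial_scores_indexes_py unsorted_arr sorted_arr → Spec_get_initial_scores_indexes_py unsorted_arr sorted_arr (get_initial_scores_indexes_py unsorted_arr sorted_arr)

-- ===== LEMMAS AND PROOFS =====

-- indices (in ascending order) at which v occurs in urow
def pvOccs (urow : List Int) (v : Int) : List Int :=
  ((PySem.List.enumerate urow).filter (fun p => p.2 == v)).map (·.1)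

-- common per-row specification: walk the sorted row, emit all occurrence indices of each
-- value the first time it is seen
def pvRowSpec (urow : List Int) : List Int → List Int → List Int
  | [], _ => []
  | v :: rest, seen =>
      if v ∈ seen then pvRowSpec urow rest seen
      else pvOccs urow v ++ pvRowSpec urow rest (seen ++ [v])

lemma pvOccs_mem {urow : List Int} {v : Int} {j : Int} (h : j ∈ pvOccs urow v) :
    ∃ (k : Nat) (hk : k < urow.length), j = (k : Int) ∧ v = urow[k] := by
  simp only [pvOccs, List.mem_map, List.mem_filter] at h
  obtain ⟨p, ⟨hp, hv⟩, hj⟩ := h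
  rw [PySem.List.mem_enumerate_iff] at hp
  obtain ⟨k, hk, rfl⟩ := hp
  refine ⟨k, hk, by omega, ?_⟩
  have hv' : urow[k] = v := by simpa using hv
  exact hv'.symm

lemma pvOccs_inj {urow : List Int} {v w : Int} {j : Int}
    (hv : j ∈ pvOccs urow v) (hw : j ∈ pvOccs urow w) : v = w := by
  obtain ⟨k, hk, rfl, rfl⟩ := pvOccs_mem hv
  obtain ⟨k', hk', hkk, rfl⟩ := pvOccs_mem hw
  have : k = k' := by omega
  subst this; rfl

lemma pvSelf_mem_occs {urow : List Int} {p : Int × Int}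
    (hp : p ∈ PySem.List.enumerate urow) : p.1 ∈ pvOccs urow p.2 := by
  simp only [pvOccs, List.mem_map, List.mem_filter]
  exact ⟨p, ⟨hp, by simp⟩, rfl⟩

-- A's inner scan over enumerate(urow): appends exactly the not-yet-present occurrence indices
lemma pvInner_eq (urow : List Int) (i : Int) :
    ∀ (acc : List Int),
      (PySem.List.enumerate urow).foldl (fun ind2 p =>
          if i == p.2 && !(ind2.contains p.1) then ind2 ++ [p.1] else ind2) acc
      = acc ++ ((PySem.List.enumerate urow).filter
          (fun p => i == p.2 && !(acc.contains p.1))).map (·.1) := by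
  have hgen : ∀ (ps : List (Int × Int)), (ps.map (·.1)).Nodup → ∀ (acc : List Int),
      ps.foldl (fun ind2 p => if i == p.2 && !(ind2.contains p.1) then ind2 ++ [p.1] else ind2) acc
      = acc ++ (ps.filter (fun p => i == p.2 && !(acc.contains p.1))).map (·.1) := by
    intro ps
    induction ps with
    | nil => intro _ acc; simp
    | cons p ps ih =>
      intro hnd acc
      simp only [List.map_cons, List.nodup_cons] at hnd
      have hfst : p.1 ∉ ps.map (·.1) := hnd.1
      rw [List.foldl_cons]
      by_cases hc : (i == p.2 && !(acc.contains p.1)) = true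
      · rw [if_pos hc, ih hnd.2]
        have hfil : ps.filter (fun q => i == q.2 && !((acc ++ [p.1]).contains q.1))
            = ps.filter (fun q => i == q.2 && !(acc.contains q.1)) := by
          apply List.filter_congr
          intro q hq
          have hne : q.1 ≠ p.1 := fun h => hfst (h ▸ List.mem_map_of_mem hq)
          simp [hne]
        rw [hfil, List.filter_cons, if_pos hc]
        simp
      · rw [if_neg hc, ih hnd.2, List.filter_cons, if_neg hc]
  intro acc
  apply hgen
  · rw [PySem.List.map_fst_enumerate]
    exact PySem.List.nodup_pyRange_one 0 _

-- A's middle loop equals pvRowSpec, under the invariant relating acc to the seen set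
lemma pvA_fold_eq (urow : List Int) :
    ∀ (srow : List Int) (seen acc : List Int),
      (∀ w (j : Int), j ∈ pvOccs urow w → (acc.contains j = decide (w ∈ seen))) →
      srow.foldl (fun ind i =>
        (PySem.List.enumerate urow).foldl (fun ind2 p =>
          if i == p.2 && !(ind2.contains p.1) then ind2 ++ [p.1] else ind2) ind) acc
      = acc ++ pvRowSpec urow srow seen := by
  intro srow
  induction srow with
  | nil => intro seen acc _; simp [pvRowSpec]
  | cons v rest ih =>
    intro seen acc hinv
    rw [List.foldl_cons, pvInner_eq urow v acc]
    by_cases hv : v ∈ seen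
    · have hnil : (PySem.List.enumerate urow).filter
          (fun p => v == p.2 && !(acc.contains p.1)) = [] := by
        rw [List.filter_eq_nil_iff]
        intro p hp
        by_cases hpv : p.2 = v
        · have h1 := hinv p.2 p.1 (pvSelf_mem_occs hp)
          simp [hpv, hv] at h1
          simp [hpv, h1]
        · have hvp : v ≠ p.2 := fun h => hpv h.symm
          simp [hvp]
      rw [hnil]
      simp only [List.map_nil, List.append_nil]
      rw [ih seen acc hinv]
      simp [pvRowSpec, hv]
    · have hfull : (PySem.List.enumerate urow).filter
          (fun p => v == p.2 && !(acc.contains p.1))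
          = (PySem.List.enumerate urow).filter (fun p => p.2 == v) := by
        apply List.filter_congr
        intro p hp
        by_cases hpv : p.2 = v
        · have h1 := hinv p.2 p.1 (pvSelf_mem_occs hp)
          simp [hpv, hv] at h1
          simp [hpv, h1]
        · have hvp : v ≠ p.2 := fun h => hpv h.symm
          rw [show (v == p.2) = false from by simp [hvp],
            show (p.2 == v) = false from by simp [hpv]]
          simp
      rw [hfull]
      have hocc : ((PySem.List.enumerate urow).filter (fun p => p.2 == v)).map (·.1)
          = pvOccs urow v := rfl
      rw [hocc, ih (seen ++ [v]) (acc ++ pvOccs urow v) ?_]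
      · simp [pvRowSpec, hv]
      · intro w j hj
        by_cases hwv : w = v
        · subst hwv
          have h1 : acc.contains j = false := by rw [hinv w j hj]; simp [hv]
          simp [List.mem_append, hj,
            (by simpa [List.contains_iff_mem] using h1 : j ∉ acc)]
        · have h2 : j ∉ pvOccs urow v := fun h => hwv (pvOccs_inj hj h)
          have h1 := hinv w j hj
          simp [List.mem_append, h2, hwv] at h1 ⊢
          simpa [List.contains_iff_mem] using h1

-- B's dict built by the first pass maps each value to its occurrence indices
lemma pvPos_getD (urow : List Int) (v : Int) :
    ((PySem.List.enumerate urow).foldl (fun d p => d.modify p.2 [] (· ++ [p.1]))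
        PySem.Dict.empty).getD v []
    = pvOccs urow v := by
  have hswap : (PySem.List.enumerate urow).foldl (fun d p => d.modify p.2 [] (· ++ [p.1]))
        PySem.Dict.empty
      = ((PySem.List.enumerate urow).map Prod.swap).foldl
          (fun d q => d.modify q.1 [] (· ++ [q.2])) PySem.Dict.empty := by
    rw [List.foldl_map]
    simp
  rw [hswap, PySem.Dict.getD_foldl_modify_append]
  simp [pvOccs, List.filter_map, List.map_map, Function.comp_def, Prod.swap]

-- getD after erase (PySem.Dict.erase filters the key out of the item list)
lemma pvGetD_erase (d : PySem.Dict Int (List Int)) (k k' : Int) :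
    (d.erase k).getD k' [] = if k' = k then [] else d.getD k' [] := by
  obtain ⟨items⟩ := d
  simp only [PySem.Dict.getD, PySem.Dict.get?, PySem.Dict.erase]
  induction items with
  | nil => simp
  | cons p ps ih =>
    by_cases h1 : p.1 = k <;> by_cases h2 : p.1 = k' <;>
      simp_all [beq_iff_eq]

-- B's second loop equals pvRowSpec, under the invariant on the dict
lemma pvB_fold_eq (urow : List Int) :
    ∀ (srow : List Int) (row : List Int) (d : PySem.Dict Int (List Int)) (seen : List Int),
      (∀ v, d.getD v [] = if v ∈ seen then [] else pvOccs urow v) →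
      (srow.foldl (fun st v => (st.1 ++ st.2.getD v [], st.2.erase v)) (row, d)).1
      = row ++ pvRowSpec urow srow seen := by
  intro srow
  induction srow with
  | nil => intro row d seen _; simp [pvRowSpec]
  | cons v rest ih =>
    intro row d seen hinv
    simp only [List.foldl_cons]
    by_cases hv : v ∈ seen
    · have hd : d.getD v [] = [] := by simp [hinv v, hv]
      rw [hd, List.append_nil, ih row (d.erase v) seen ?_]
      · simp [pvRowSpec, hv]
      · intro w
        rw [pvGetD_erase]
        by_cases hwv : w = v
        · simp [hwv, hv]
        · simp [hwv, hinv w]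
    · have hd : d.getD v [] = pvOccs urow v := by simp [hinv v, hv]
      rw [hd, ih (row ++ pvOccs urow v) (d.erase v) (seen ++ [v]) ?_]
      · simp [pvRowSpec, hv]
      · intro w
        rw [pvGetD_erase]
        by_cases hwv : w = v
        · simp [hwv]
        · simp [hwv, hinv w, List.mem_append]

-- both per-row computations agree (each equals pvRowSpec from the empty seen set)
lemma pvRow_eq (urow srow : List Int) :
    (PySem.List.enumerate srow).foldl (fun ind q =>
        (PySem.List.enumerate urow).foldl (fun ind2 p =>
          if q.2 == p.2 && !(ind2.contains p.1) then ind2 ++ [p.1] else ind2) ind) []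
    = (srow.foldl (fun st v => (st.1 ++ st.2.getD v [], st.2.erase v))
        (([] : List Int),
         (PySem.List.enumerate urow).foldl (fun d p => d.modify p.2 [] (· ++ [p.1]))
           PySem.Dict.empty)).1 := by
  have hA : (PySem.List.enumerate srow).foldl (fun ind q =>
        (PySem.List.enumerate urow).foldl (fun ind2 p =>
          if q.2 == p.2 && !(ind2.contains p.1) then ind2 ++ [p.1] else ind2) ind) []
      = srow.foldl (fun ind i =>
        (PySem.List.enumerate urow).foldl (fun ind2 p =>
          if i == p.2 && !(ind2.contains p.1) then ind2 ++ [p.1] else ind2) ind) [] := by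
    have := PySem.List.map_snd_enumerate srow 0
    conv_rhs => rw [← this]
    rw [List.foldl_map]
  rw [hA, pvA_fold_eq urow srow [] [] (by intro w j _; simp),
    pvB_fold_eq urow srow [] _ [] (by intro v; simp [pvPos_getD])]

-- ===== VERDICT (by name: the statement is the Claim_ definition above) =====
theorem get_initial_scores_indexes_py_spec : Claim_equal_get_initial_scores_indexes_py := by
  intro u s _ hpre
  unfold Spec_get_initial_scores_indexes_py
  unfold get_initial_scores_indexes_py get_initial_scores_indexes_py_alt
  unfold Pre_get_initial_scores_indexes_py at hpre
  rw [PySem.List.foldl_append_singleton_eq_map, List.nil_append]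
  apply List.ext_getElem
  · simp [PySem.List.length_pyRange_one, PySem.List.len]
    omega
  · intro k hk1 hk2
    simp only [List.getElem_map, PySem.List.getElem_pyRange_one, zero_add]
    have hku : k < u.length := by
      simpa [PySem.List.length_pyRange_one, PySem.List.len] using hk1
    have hks : k < s.length := by omega
    rw [List.getElem_zip]
    have hu : PySem.List.pyGetD u (k : Int) [] = u[k] := by
      rw [PySem.List.pyGetD_natCast]; exact List.getD_eq_getElem _ _ hku
    have hs : PySem.List.pyGetD s (k : Int) [] = s[k] := by
      rw [PySem.List.pyGetD_natCast]; exact List.getD_eq_getElem _ _ hks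
    rw [hu, hs]
    exact pvRow_eq u[k] s[k]
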